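-- pv_equiv track=rewrite | github.com/takingstock/CodeSapper | code_db/python/heuristic_TblDetection.py | isNumericalorAlpha
-- ===== SOURCE A (Python) =====
-- def isNumericalorAlpha( txt ):
--         if len( txt ) <= 1 or txt in ['',' ']: return False
--         dig, alph = 0, 0
--         txt = txt.replace(' ','')
--         for char in txt:
--                 if ( ord(char) >= 48 and ord(char) <= 57 ) or \
--                         '.' == char or ',' == char or '$' == char:# or \
--                         #( ord(char) >= 65 and ord(char) <= 90 ):
--                         if ord(char) >= 48 and ord(char) <= 57: dig += 1
--                         if ord(char) >= 65 and ord(char) <= 90: alph += 1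
--                         continue
--                 else:
--                         return False
--
--         if dig < 1 : return False
--         if '.' in txt:
--           arr_ = txt.split('.')
--           #if len(arr_[-1]) > 2: return False ## basically to avoid DATE being caught here
--           ## since mostly numbers will have only 2 digits after decimal
--         #if dig < 1 or not ( ',' in txt or '.' in txt ) : return False
--
--         return True
-- ===== SOURCE B (Python) =====
-- def isNumericalorAlpha(txt):
--     if len(txt) <= 1:
--         return False
--     s = txt.replace(' ', '')
--     # s consists only of allowed chars iff stripping them from both ends leaves '';
--     # s contains a digit iff it is not made of '.,$' alone, i.e. stripping '.,$' leaves something.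
--     return s.strip('0123456789.,$') == '' and s.strip('.,$') != ''
-- ===== Notes on version B (the rewrite author's own statement) =====
-- stated objective: simpler
-- what changed: Replaces A's per-character counting loop with early returns (and dead dot-split code) by two str.strip passes on the space-stripped string: stripping the allowed digit/punctuation characters must leave the empty string (all characters allowed) and stripping the punctuation characters alone must leave something (a digit is present).
import Mathlib
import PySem

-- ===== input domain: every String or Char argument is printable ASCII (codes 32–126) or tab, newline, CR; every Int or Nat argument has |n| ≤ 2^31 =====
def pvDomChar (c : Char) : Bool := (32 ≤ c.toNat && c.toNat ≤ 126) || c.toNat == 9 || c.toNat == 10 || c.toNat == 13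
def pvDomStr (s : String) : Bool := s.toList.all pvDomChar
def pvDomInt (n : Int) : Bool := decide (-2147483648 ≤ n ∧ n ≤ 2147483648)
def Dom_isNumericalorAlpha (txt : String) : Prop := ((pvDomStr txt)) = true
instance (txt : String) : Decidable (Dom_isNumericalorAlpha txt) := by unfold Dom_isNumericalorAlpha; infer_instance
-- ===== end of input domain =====

-- B replaces A's per-character counting loop by two str.strip passes on the space-stripped
-- string: stripping the allowed chars must leave "" and stripping punctuation alone must not; objective: simpler.

-- ===== PORT A =====
-- A's for-loop: dig/alph counters, early `return False` on a disallowed char, then `dig < 1 → False`.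
-- (A's '.'-split only binds the unused arr_, so it has no effect on the result and is not ported.)
def pvLoopA : List Char → Int → Int → Bool
  | [], dig, _alph => if dig < 1 then false else true
  | c :: cs, dig, alph =>
    if (48 ≤ c.toNat ∧ c.toNat ≤ 57) ∨ c = '.' ∨ c = ',' ∨ c = '$' then
      pvLoopA cs (if 48 ≤ c.toNat ∧ c.toNat ≤ 57 then dig + 1 else dig)
                 (if 65 ≤ c.toNat ∧ c.toNat ≤ 90 then alph + 1 else alph)
    else false

def isNumericalorAlpha (txt : String) : Bool :=
  if PySem.Str.len txt ≤ 1 ∨ txt = "" ∨ txt = " " then false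
  else pvLoopA (PySem.Str.replace txt " " "").toList 0 0

-- ===== PORT B =====
def isNumericalorAlpha_alt (txt : String) : Bool :=
  if PySem.Str.len txt ≤ 1 then false
  else
    let s := PySem.Str.replace txt " " ""
    (PySem.Str.stripChars s "0123456789.,$" == "") &&
    !(PySem.Str.stripChars s ".,$" == "")

-- ===== PRECONDITION & SPEC =====
def Spec_isNumericalorAlpha (txt : String) (out : Bool) : Prop := out = isNumericalorAlpha_alt txt
instance (txt : String) (out : Bool) : Decidable (Spec_isNumericalorAlpha txt out) := by unfold Spec_isNumericalorAlpha; infer_instance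

-- ===== CLAIM (what is proved, stated in full; the proofs are below) =====
def Claim_equal_isNumericalorAlpha : Prop := ∀ (txt : String), Dom_isNumericalorAlpha txt → Spec_isNumericalorAlpha txt (isNumericalorAlpha txt)

-- ===== LEMMAS AND PROOFS =====

theorem toList_allowed :
    "0123456789.,$".toList = ['0','1','2','3','4','5','6','7','8','9','.',',','$'] := by decide

theorem toList_punct : ".,$".toList = ['.',',','$'] := by decide

theorem digit_iff (c : Char) :
    c ∈ ['0','1','2','3','4','5','6','7','8','9'] ↔ (48 ≤ c.toNat ∧ c.toNat ≤ 57) := by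
  constructor
  · intro h; fin_cases h <;> exact ⟨by decide, by decide⟩
  · rintro ⟨h1, h2⟩
    have hc : Char.ofNat c.toNat = c := Char.ofNat_toNat c
    interval_cases h : c.toNat <;> simp [← hc]

theorem allowed_iff (c : Char) :
    c ∈ "0123456789.,$".toList ↔
      ((48 ≤ c.toNat ∧ c.toNat ≤ 57) ∨ c = '.' ∨ c = ',' ∨ c = '$') := by
  rw [toList_allowed]
  constructor
  · intro h; fin_cases h <;> first | (left; exact ⟨by decide, by decide⟩) | simp
  · rintro (⟨h1, h2⟩ | h | h | h)
    · have := (digit_iff c).2 ⟨h1, h2⟩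
      simp at this ⊢; tauto
    all_goals simp [h]

theorem punct_iff (c : Char) :
    c ∈ ".,$".toList ↔ (c = '.' ∨ c = ',' ∨ c = '$') := by
  rw [toList_punct]
  constructor
  · intro h; fin_cases h <;> simp
  · rintro (h | h | h) <;> simp [h]

theorem all_dropWhile_iff (p : Char → Bool) (s : List Char) :
    (∀ x ∈ List.dropWhile p s, p x = true) ↔ ∀ x ∈ s, p x = true := by
  constructor
  · intro h x hx
    have hx' : x ∈ List.takeWhile p s ++ List.dropWhile p s := by
      rw [List.takeWhile_append_dropWhile]; exact hx
    rcases List.mem_append.mp hx' with h1 | h1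
    · exact List.mem_takeWhile_imp h1
    · exact h x h1
  · intro h x hx
    exact h x ((List.dropWhile_sublist (p := p) (l := s)).subset hx)

-- stripping removes only chars of the set from both ends, so the result is empty
-- exactly when every char of the string is in the set
theorem stripChars_eq_nil_iff (s chars : List Char) :
    PySem.Chars.stripChars s chars = [] ↔ ∀ c ∈ s, c ∈ chars := by
  unfold PySem.Chars.stripChars
  rw [List.reverse_eq_nil_iff, List.dropWhile_eq_nil_iff]
  simp only [List.mem_reverse]
  rw [all_dropWhile_iff]
  simp [List.contains_eq_mem]

-- A's loop characterised: every char allowed, and a digit was seen (or dig was already ≥ 1)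
theorem pvLoopA_eq (cs : List Char) : ∀ (dig alph : Int), 0 ≤ dig →
    pvLoopA cs dig alph =
      (cs.all (fun c => decide ((48 ≤ c.toNat ∧ c.toNat ≤ 57) ∨ c = '.' ∨ c = ',' ∨ c = '$')) &&
       (cs.any (fun c => decide (48 ≤ c.toNat ∧ c.toNat ≤ 57)) || decide (1 ≤ dig))) := by
  induction cs with
  | nil =>
    intro dig alph hd
    simp only [pvLoopA, List.all_nil, List.any_nil, Bool.true_and, Bool.false_or]
    split_ifs with h <;> simp <;> omega
  | cons c cs ih =>
    intro dig alph hd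
    simp only [pvLoopA, List.all_cons, List.any_cons]
    by_cases hall : (48 ≤ c.toNat ∧ c.toNat ≤ 57) ∨ c = '.' ∨ c = ',' ∨ c = '$'
    · rw [if_pos hall]
      by_cases hdig : 48 ≤ c.toNat ∧ c.toNat ≤ 57
      · rw [if_pos hdig, ih _ _ (by omega)]
        simp [hdig]
        intro _; omega
      · rw [if_neg hdig, ih _ _ hd]
        rcases hall with h | h | h | h
        · exact absurd h hdig
        all_goals simp [h]
    · rw [if_neg hall]; simp [hall]

-- B's strip test as a membership statement over the characters
theorem strip_empty_iff (s c : String) :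
    (PySem.Str.stripChars s c == "") = true ↔ ∀ x ∈ s.toList, x ∈ c.toList := by
  rw [beq_iff_eq, ← stripChars_eq_nil_iff, ← PySem.Str.toList_stripChars,
    ← String.toList_inj]
  rfl

-- its negation, for the `!=` test in B
theorem strip_nonempty_iff (s c : String) :
    ((PySem.Str.stripChars s c == "") = false) ↔ ¬ ∀ x ∈ s.toList, x ∈ c.toList := by
  rw [← strip_empty_iff]
  simp

-- ===== VERDICT (by name: the statement is the Claim_ definition above) =====
theorem isNumericalorAlpha_spec : Claim_equal_isNumericalorAlpha := by
  intro txt _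
  unfold Spec_isNumericalorAlpha isNumericalorAlpha isNumericalorAlpha_alt
  by_cases h : PySem.Str.len txt ≤ 1
  · rw [if_pos (Or.inl h), if_pos h]
  · have hg : ¬ (PySem.Str.len txt ≤ 1 ∨ txt = "" ∨ txt = " ") := by
      rintro (h' | e | e)
      · exact h h'
      · subst e; exact h (by decide)
      · subst e; exact h (by decide)
    rw [if_neg hg, if_neg h]
    rw [pvLoopA_eq _ 0 0 le_rfl]
    rw [Bool.eq_iff_iff]
    simp only [Bool.and_eq_true, Bool.not_eq_true', Bool.or_eq_true,
      List.all_eq_true, List.any_eq_true, decide_eq_true_eq,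
      strip_empty_iff, strip_nonempty_iff]
    have h10 : ¬ ((1:Int) ≤ 0) := by omega
    constructor
    · rintro ⟨ha, (⟨c, hc, hcd⟩ | habs)⟩
      · refine ⟨fun x hx => (allowed_iff x).2 (ha x hx), ?_⟩
        · intro hall
          have := (punct_iff c).1 (hall c hc)
          rcases this with e | e | e <;> subst e <;> simp at hcd
      · exact absurd habs h10
    · rintro ⟨ha, hnp⟩
      refine ⟨fun x hx => (allowed_iff x).1 (ha x hx), Or.inl ?_⟩
      by_contra hnd
      push Not at hnd
      apply hnp
      intro c hc
      rcases (allowed_iff c).1 (ha c hc) with hd | hp | hp | hp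
      · exact absurd (hnd c hc hd.1) (by omega)
      · exact (punct_iff c).2 (Or.inl hp)
      · exact (punct_iff c).2 (Or.inr (Or.inl hp))
      · exact (punct_iff c).2 (Or.inr (Or.inr hp))
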